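-- pv_equiv track=rewrite | github.com/hay86/leetcode | 101-200/132.py | palrange
-- ===== SOURCE A (Python) =====
-- def palrange(s):
--     arr = ['#']
--     for ss in s:
--         arr.append(ss)
--         arr.append('#')
--     size = len(arr)
--     p = [1]*size
--     ret = []
--     right, index = -1, -1
--     for i in range(size):
--         if i < right:
--             p[i] = min(p[2*index-i], right-i)
--         l, r = i-p[i], i+p[i]
--         while l >= 0 and r < size and arr[l] == arr[r]:
--             p[i] += 1
--             l -= 1
--             r += 1
--         if r > right:
--             right = r
--             index = i
--         if l+2 <= r-2:
--             ret.append((l+2,r-2))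
--         else:
--             ret.append((-1,-1))
--     return ret
-- ===== SOURCE B (Python) =====
-- def palrange(s):
--     arr = ['#']
--     for ss in s:
--         arr.append(ss)
--         arr.append('#')
--     size = len(arr)
--     ret = []
--     for i in range(size):
--         l, r = i - 1, i + 1
--         while l >= 0 and r < size and arr[l] == arr[r]:
--             l -= 1
--             r += 1
--         ret.append((l + 2, r - 2) if l + 2 <= r - 2 else (-1, -1))
--     return ret
-- ===== Notes on version B (the rewrite author's own statement) =====
-- stated objective: simpler
-- what changed: Replaced the Manacher core (mirror array p, right boundary and center index reused across centers) by an independent naive outward expansion l,r = i-1,i+1 per center; the hash-interleaving and the range-emitting tail are unchanged.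
import Mathlib
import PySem

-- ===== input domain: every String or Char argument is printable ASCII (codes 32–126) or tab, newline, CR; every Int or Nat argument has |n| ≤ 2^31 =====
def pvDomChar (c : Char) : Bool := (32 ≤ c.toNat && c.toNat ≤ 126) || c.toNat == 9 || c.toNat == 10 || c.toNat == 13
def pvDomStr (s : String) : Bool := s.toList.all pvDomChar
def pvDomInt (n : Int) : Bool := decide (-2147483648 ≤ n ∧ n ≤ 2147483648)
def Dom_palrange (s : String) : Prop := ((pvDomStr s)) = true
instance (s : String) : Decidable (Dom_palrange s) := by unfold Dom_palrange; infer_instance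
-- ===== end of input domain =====

-- B replaces the Manacher core (mirror/right-boundary reuse) by an independent naive
-- expansion around each center; the hash-interleaving and the range-emitting tail are shared.

-- shared helper: the hash-interleaved array (identical preprocessing in A and B)
def pvArr (cs : List Char) : List Char := cs.foldl (fun a c => a ++ [c, '#']) ['#']

-- shared helper: arr[x] under the loop guards (index is provably in range there)
def pvGetA (arr : List Char) (x : Int) : Char := arr.getD x.toNat '#'

-- ===== PORT A =====
-- inner `while l >= 0 and r < size and arr[l] == arr[r]` of A, carrying p[i]
def aloop (arr : List Char) (pi l r : Int) : Int × Int × Int :=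
  if h : 0 ≤ l ∧ r < (arr.length : Int) ∧ pvGetA arr l = pvGetA arr r then
    aloop arr (pi + 1) (l - 1) (r + 1)
  else (pi, l, r)
termination_by (l + 1).toNat
decreasing_by omega

-- one iteration of A's `for i in range(size)` over state (p, ret, right, index)
def astep (arr : List Char) (st : List Int × List (Int × Int) × Int × Int) (i : Int) :
    List Int × List (Int × Int) × Int × Int :=
  let p := st.1
  let ret := st.2.1
  let right := st.2.2.1
  let index := st.2.2.2
  let p1 := if i < right then p.set i.toNat (min (p.getD (2 * index - i).toNat 1) (right - i)) else p
  let pi := p1.getD i.toNat 1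
  let t := aloop arr pi (i - pi) (i + pi)
  let p2 := p1.set i.toNat t.1
  let ret2 := if t.2.1 + 2 ≤ t.2.2 - 2 then ret ++ [(t.2.1 + 2, t.2.2 - 2)] else ret ++ [(-1, -1)]
  if t.2.2 > right then (p2, ret2, t.2.2, i) else (p2, ret2, right, index)

def palrange (s : String) : List (Int × Int) :=
  let arr := pvArr s.toList
  (((List.range arr.length).map Int.ofNat).foldl (astep arr)
      (List.replicate arr.length 1, [], -1, -1)).2.1

-- ===== PORT B =====
-- naive outward expansion: `while l >= 0 and r < size and arr[l] == arr[r]: l -= 1; r += 1`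
def bexpand (arr : List Char) (l r : Int) : Int × Int :=
  if h : 0 ≤ l ∧ r < (arr.length : Int) ∧ pvGetA arr l = pvGetA arr r then
    bexpand arr (l - 1) (r + 1)
  else (l, r)
termination_by (l + 1).toNat
decreasing_by omega

def bentry (arr : List Char) (i : Int) : Int × Int :=
  let t := bexpand arr (i - 1) (i + 1)
  if t.1 + 2 ≤ t.2 - 2 then (t.1 + 2, t.2 - 2) else (-1, -1)

def palrange_alt (s : String) : List (Int × Int) :=
  let arr := pvArr s.toList
  (List.range arr.length).map (fun i => bentry arr (Int.ofNat i))

-- ===== PRECONDITION & SPEC =====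
def Spec_palrange (s : String) (out : List (Int × Int)) : Prop := out = palrange_alt s
instance (s : String) (out : List (Int × Int)) : Decidable (Spec_palrange s out) := by unfold Spec_palrange; infer_instance

-- ===== CLAIM (what is proved, stated in full; the proofs are below) =====
def Claim_equal_palrange : Prop := ∀ (s : String), Dom_palrange s → Spec_palrange s (palrange s)

-- ===== LEMMAS AND PROOFS =====

-- basic facts about bexpand
lemma bexpand_sum (arr : List Char) (l r : Int) :
    (bexpand arr l r).1 + (bexpand arr l r).2 = l + r := by
  induction l, r using bexpand.induct arr with
  | case1 l r h ih => rw [bexpand, dif_pos h]; omega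
  | case2 l r h => rw [bexpand, dif_neg h]

lemma bexpand_le (arr : List Char) (l r : Int) : (bexpand arr l r).1 ≤ l := by
  induction l, r using bexpand.induct arr with
  | case1 l r h ih => rw [bexpand, dif_pos h]; omega
  | case2 l r h => rw [bexpand, dif_neg h]

lemma bexpand_ge (arr : List Char) (l r : Int) (hl : -1 ≤ l) : -1 ≤ (bexpand arr l r).1 := by
  induction l, r using bexpand.induct arr with
  | case1 l r h ih => rw [bexpand, dif_pos h]; exact ih (by omega)
  | case2 l r h => rw [bexpand, dif_neg h]; exact hl

lemma bexpand_r_le (arr : List Char) (l r : Int) (hr : r ≤ (arr.length : Int)) :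
    (bexpand arr l r).2 ≤ (arr.length : Int) := by
  induction l, r using bexpand.induct arr with
  | case1 l r h ih => rw [bexpand, dif_pos h]; exact ih (by omega)
  | case2 l r h => rw [bexpand, dif_neg h]; exact hr

-- every position strictly inside the final interval, up to the start, matched
lemma bexpand_path (arr : List Char) (l r : Int) :
    ∀ x : Int, (bexpand arr l r).1 < x → x ≤ l →
      0 ≤ x ∧ r + (l - x) < (arr.length : Int) ∧ pvGetA arr x = pvGetA arr (r + (l - x)) := by
  induction l, r using bexpand.induct arr with
  | case1 l r h ih =>
    intro x hx1 hx2
    rw [bexpand, dif_pos h] at hx1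
    rcases eq_or_lt_of_le hx2 with heq | hlt
    · subst heq; exact ⟨h.1, by omega, by simpa using h.2.2⟩
    · have := ih x hx1 (by omega)
      refine ⟨this.1, by omega, ?_⟩
      have e : r + 1 + (l - 1 - x) = r + (l - x) := by omega
      rw [e] at this; exact this.2.2
  | case2 l r h =>
    intro x hx1 hx2
    rw [bexpand, dif_neg h] at hx1
    omega

lemma bexpand_unfold_pos (arr : List Char) (l r : Int)
    (h : 0 ≤ l ∧ r < (arr.length : Int) ∧ pvGetA arr l = pvGetA arr r) :
    bexpand arr l r = bexpand arr (l - 1) (r + 1) := by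
  rw [bexpand, dif_pos h]

-- aloop = bexpand plus a step counter
lemma aloop_eq_bexpand (arr : List Char) (pi l r : Int) :
    aloop arr pi l r = (pi + (l - (bexpand arr l r).1), bexpand arr l r) := by
  induction pi, l, r using aloop.induct arr with
  | case1 pi l r h ih =>
    rw [aloop, dif_pos h, bexpand, dif_pos h, ih]
    have := bexpand_le arr (l - 1) (r + 1)
    refine Prod.ext ?_ rfl
    simp only []
    omega
  | case2 pi l r h =>
    rw [aloop, dif_neg h, bexpand, dif_neg h]
    simp

-- seeded expansion equals expansion from scratch when the skipped positions all match
lemma seed_expand (arr : List Char) (i : Int) (t : Nat) (ht : 1 ≤ t)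
    (hm : ∀ k : Int, 1 ≤ k → k < (t : Int) →
      0 ≤ i - k ∧ i + k < (arr.length : Int) ∧ pvGetA arr (i - k) = pvGetA arr (i + k)) :
    bexpand arr (i - (t : Int)) (i + (t : Int)) = bexpand arr (i - 1) (i + 1) := by
  induction t with
  | zero => omega
  | succ t ih =>
    rcases Nat.eq_or_lt_of_le ht with h1 | h1
    · simp [← h1]
    · have ht' : 1 ≤ t := by omega
      have hk := hm (t : Int) (by exact_mod_cast ht') (by push_cast; omega)
      have e1 : i - ((t + 1 : Nat) : Int) = (i - (t : Int)) - 1 := by push_cast; omega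
      have e2 : i + ((t + 1 : Nat) : Int) = (i + (t : Int)) + 1 := by push_cast; omega
      rw [e1, e2, ← bexpand_unfold_pos arr _ _ ⟨hk.1, hk.2.1, hk.2.2⟩]
      exact ih ht' (fun k h1 h2 => hm k h1 (by push_cast at h2 ⊢; omega))

-- p[j] records a correct palindrome radius at center j
def Pg (arr : List Char) (p : List Int) (j : Nat) : Prop :=
  1 ≤ p.getD j 1 ∧ 0 ≤ (j : Int) - (p.getD j 1 - 1) ∧
  (j : Int) + (p.getD j 1 - 1) < (arr.length : Int) ∧
  ∀ k : Int, 0 ≤ k → k < p.getD j 1 →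
    pvGetA arr ((j : Int) - k) = pvGetA arr ((j : Int) + k)

-- symmetric form of the matching clause of Pg
lemma Pg_sym (arr : List Char) (p : List Int) (j : Nat) (hp : Pg arr p j)
    (m : Int) (h1 : -(p.getD j 1) < m) (h2 : m < p.getD j 1) :
    pvGetA arr ((j : Int) - m) = pvGetA arr ((j : Int) + m) := by
  by_cases hm : 0 ≤ m
  · exact hp.2.2.2 m hm h2
  · have := hp.2.2.2 (-m) (by omega) (by omega)
    rw [show (j : Int) - m = (j : Int) + (-m) by ring, show (j : Int) + m = (j : Int) - (-m) by ring]
    exact this.symm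

-- the loop invariant of A's fold
def AInv (arr : List Char) (i : Nat) (st : List Int × List (Int × Int) × Int × Int) : Prop :=
  st.1.length = arr.length ∧
  st.2.1 = (List.range i).map (fun j => bentry arr (Int.ofNat j)) ∧
  (∀ j : Nat, i ≤ j → st.1.getD j 1 = 1) ∧
  (∀ j : Nat, j < i → Pg arr st.1 j) ∧
  ((st.2.2.1 = -1 ∧ st.2.2.2 = -1) ∨
    (∃ idx : Nat, st.2.2.2 = (idx : Int) ∧ idx < i ∧
      st.2.2.1 = (idx : Int) + st.1.getD idx 1))


lemma bexpand_r_ge (arr : List Char) (l r : Int) : r ≤ (bexpand arr l r).2 := by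
  induction l, r using bexpand.induct arr with
  | case1 l r h ih => rw [bexpand, dif_pos h]; omega
  | case2 l r h => rw [bexpand, dif_neg h]

lemma getD_set_self' (l : List Int) (i : Nat) (v : Int) (h : i < l.length) :
    (l.set i v).getD i 1 = v := by
  simp [List.getD, h]

lemma getD_set_ne' (l : List Int) (i j : Nat) (v : Int) (h : i ≠ j) :
    (l.set i v).getD j 1 = l.getD j 1 := by
  simp [List.getD, List.getElem?_set_ne h]

lemma Pg_congr (arr : List Char) (p q : List Int) (j : Nat)
    (h : q.getD j 1 = p.getD j 1) (hp : Pg arr p j) : Pg arr q j := by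
  unfold Pg at *
  rw [h]
  exact hp

-- the common tail of one iteration of A, over an abstract already-seeded p1
lemma tail_inv (arr : List Char) (p1 : List Int) (ret : List (Int × Int)) (right index : Int)
    (i : Nat)
    (hlen : p1.length = arr.length) (hi : i < arr.length)
    (hone : ∀ j : Nat, i + 1 ≤ j → p1.getD j 1 = 1)
    (hpg : ∀ j : Nat, j < i → Pg arr p1 j)
    (hret : ret = (List.range i).map (fun j => bentry arr (Int.ofNat j)))
    (hri : (right = -1 ∧ index = -1) ∨
      (∃ idx : Nat, index = (idx : Int) ∧ idx < i ∧ right = (idx : Int) + p1.getD idx 1))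
    (hpi : 1 ≤ p1.getD i 1)
    (hseed : bexpand arr ((i : Int) - p1.getD i 1) ((i : Int) + p1.getD i 1)
      = bexpand arr ((i : Int) - 1) ((i : Int) + 1)) :
    AInv arr (i + 1)
      (let pi := p1.getD ((i : Int)).toNat 1;
       let t := aloop arr pi ((i : Int) - pi) ((i : Int) + pi);
       let p2 := p1.set ((i : Int)).toNat t.1;
       let ret2 := if t.2.1 + 2 ≤ t.2.2 - 2 then ret ++ [(t.2.1 + 2, t.2.2 - 2)]
                   else ret ++ [(-1, -1)];
       if t.2.2 > right then (p2, ret2, t.2.2, (i : Int)) else (p2, ret2, right, index)) := by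
  simp only [Int.toNat_natCast]
  set pi := p1.getD i 1 with hpidef
  have htl : aloop arr pi ((i : Int) - pi) ((i : Int) + pi)
      = (pi + (((i : Int) - pi) - (bexpand arr ((i : Int) - 1) ((i : Int) + 1)).1),
         bexpand arr ((i : Int) - 1) ((i : Int) + 1)) := by
    rw [aloop_eq_bexpand, hseed]
  rw [htl]
  set E := bexpand arr ((i : Int) - 1) ((i : Int) + 1) with hE
  have hsum : E.1 + E.2 = ((i : Int) - 1) + ((i : Int) + 1) := bexpand_sum arr _ _
  have hle : E.1 ≤ (i : Int) - 1 := bexpand_le arr _ _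
  have hge : -1 ≤ E.1 := bexpand_ge arr _ _ (by omega)
  have hrle : E.2 ≤ (arr.length : Int) := bexpand_r_le arr _ _ (by omega)
  have hrge : (i : Int) + 1 ≤ E.2 := bexpand_r_ge arr _ _
  have hq1 : 1 ≤ pi + ((i : Int) - pi - E.1) := by omega
  have hilen : i < p1.length := by omega
  have hp2i : (p1.set i (pi + ((i : Int) - pi - E.1))).getD i 1
      = pi + ((i : Int) - pi - E.1) := getD_set_self' _ _ _ hilen
  have hp2ne : ∀ j : Nat, j ≠ i →
      (p1.set i (pi + ((i : Int) - pi - E.1))).getD j 1 = p1.getD j 1 := by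
    intro j hj; exact getD_set_ne' _ _ _ _ (Ne.symm hj)
  have hpgi : Pg arr (p1.set i (pi + ((i : Int) - pi - E.1))) i := by
    refine ⟨by rw [hp2i]; omega, by rw [hp2i]; omega, by rw [hp2i]; omega, ?_⟩
    rw [hp2i]
    intro k hk0 hkq
    rcases eq_or_lt_of_le hk0 with h0 | h0
    · rw [← h0]; simp
    · have hx := bexpand_path arr ((i : Int) - 1) ((i : Int) + 1) ((i : Int) - k)
        (by rw [← hE]; omega) (by omega)
      have e : (i : Int) + 1 + ((i : Int) - 1 - ((i : Int) - k)) = (i : Int) + k := by omega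
      rw [e] at hx
      exact hx.2.2
  have hretnew : (if E.1 + 2 ≤ E.2 - 2 then ret ++ [(E.1 + 2, E.2 - 2)] else ret ++ [(-1, -1)])
      = (List.range (i + 1)).map (fun j => bentry arr (Int.ofNat j)) := by
    rw [List.range_succ, List.map_append, hret]
    have hb : bentry arr (Int.ofNat i)
        = if E.1 + 2 ≤ E.2 - 2 then (E.1 + 2, E.2 - 2) else (-1, -1) := by
      unfold bentry
      rw [show (Int.ofNat i) = (i : Int) from rfl, ← hE]
    rw [List.map_singleton, hb]
    split <;> rfl
  by_cases hgt : E.2 > right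
  · rw [if_pos hgt]
    refine ⟨by simpa using hlen, hretnew, ?_, ?_, ?_⟩
    · intro j hj; rw [hp2ne j (by omega)]; exact hone j hj
    · intro j hj
      rcases Nat.lt_or_ge j i with h | h
      · exact Pg_congr arr p1 _ j (hp2ne j (by omega)) (hpg j h)
      · have : j = i := by omega
        subst this; exact hpgi
    · refine Or.inr ⟨i, rfl, by omega, ?_⟩
      show E.2 = (i : Int) + (p1.set i (pi + ((i : Int) - pi - E.1))).getD i 1
      rw [hp2i]; omega
  · rw [if_neg hgt]
    refine ⟨by simpa using hlen, hretnew, ?_, ?_, ?_⟩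
    · intro j hj; rw [hp2ne j (by omega)]; exact hone j hj
    · intro j hj
      rcases Nat.lt_or_ge j i with h | h
      · exact Pg_congr arr p1 _ j (hp2ne j (by omega)) (hpg j h)
      · have : j = i := by omega
        subst this; exact hpgi
    · rcases hri with ⟨hr, hx⟩ | ⟨idx, h1, h2, h3⟩
      · omega
      · exact Or.inr ⟨idx, h1, by omega, by rw [hp2ne idx (by omega)]; exact h3⟩

lemma inv_step (arr : List Char) (i : Nat) (st : List Int × List (Int × Int) × Int × Int)
    (hinv : AInv arr i st) (hi : i < arr.length) :
    AInv arr (i + 1) (astep arr st (i : Int)) := by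
  obtain ⟨p, ret, right, index⟩ := st
  obtain ⟨hlen, hret, hone, hpg, hri⟩ := hinv
  dsimp only at hlen hret hone hpg hri
  by_cases hir : (i : Int) < right
  · -- seeded case: i lies inside the known right boundary
    rcases hri with ⟨hr, -⟩ | ⟨idx, h1, h2, h3⟩
    · omega
    subst h1
    have hpgidx : Pg arr p idx := hpg idx h2
    obtain ⟨hq1, hq2, hq3, hqm⟩ := hpgidx
    have hile : i ≤ 2 * idx := by omega
    set j : Nat := 2 * idx - i with hjdef
    have hjZ : ((j : Int)) = 2 * (idx : Int) - (i : Int) := by omega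
    have hji : j < i := by omega
    have hpgj : Pg arr p j := hpg j hji
    obtain ⟨hqj1, hqj2, hqj3, hqjm⟩ := hpgj
    set seed : Int := min (p.getD j 1) (right - (i : Int)) with hseeddef
    have hseed1 : 1 ≤ seed := by omega
    have hmatch : ∀ k : Int, 1 ≤ k → k < seed →
        0 ≤ (i : Int) - k ∧ (i : Int) + k < (arr.length : Int) ∧
        pvGetA arr ((i : Int) - k) = pvGetA arr ((i : Int) + k) := by
      intro k hk1 hk2
      have hkqj : k < p.getD j 1 := by omega
      have hkri : k < right - (i : Int) := by omega
      refine ⟨by omega, by omega, ?_⟩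
      have step1 := hqm ((i : Int) - (idx : Int) + k) (by omega) (by omega)
      have step2 := hqjm k (by omega) hkqj
      have step3 := Pg_sym arr p idx ⟨hq1, hq2, hq3, hqm⟩ ((i : Int) - (idx : Int) - k)
        (by omega) (by omega)
      calc pvGetA arr ((i : Int) - k)
          = pvGetA arr ((idx : Int) + ((i : Int) - (idx : Int) - k)) := by
            rw [show (idx : Int) + ((i : Int) - (idx : Int) - k) = (i : Int) - k by ring]
        _ = pvGetA arr ((idx : Int) - ((i : Int) - (idx : Int) - k)) := step3.symm
        _ = pvGetA arr ((j : Int) + k) := by rw [show (idx : Int) - ((i : Int) - (idx : Int) - k) = (j : Int) + k by omega]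
        _ = pvGetA arr ((j : Int) - k) := step2.symm
        _ = pvGetA arr ((idx : Int) - ((i : Int) - (idx : Int) + k)) := by rw [show (idx : Int) - ((i : Int) - (idx : Int) + k) = (j : Int) - k by omega]
        _ = pvGetA arr ((idx : Int) + ((i : Int) - (idx : Int) + k)) := step1
        _ = pvGetA arr ((i : Int) + k) := by
            rw [show (idx : Int) + ((i : Int) - (idx : Int) + k) = (i : Int) + k by ring]
    have hmain := tail_inv arr (p.set i seed) ret right (idx : Int) i
      (by simpa using hlen) hi
      (fun j' hj' => by rw [getD_set_ne' _ _ _ _ (by omega)]; exact hone j' (by omega))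
      (fun j' hj' => Pg_congr arr p _ j' (getD_set_ne' _ _ _ _ (by omega)) (hpg j' hj'))
      hret
      (Or.inr ⟨idx, rfl, h2, by rw [getD_set_ne' _ _ _ _ (by omega)]; exact h3⟩)
      (by rw [getD_set_self' _ _ _ (by omega)]; omega)
      (by
        rw [getD_set_self' _ _ _ (by omega)]
        have htn : ((seed.toNat : Nat) : Int) = seed := by omega
        rw [show (i : Int) - seed = (i : Int) - (seed.toNat : Int) by omega,
            show (i : Int) + seed = (i : Int) + (seed.toNat : Int) by omega]
        exact seed_expand arr (i : Int) seed.toNat (by omega)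
          (fun k h1 h2 => hmatch k h1 (by omega)))
    have harg : (2 * (idx : Int) - (i : Int)).toNat = j := by omega
    have hitn : ((i : Int)).toNat = i := by omega
    unfold astep
    simp only [if_pos hir, harg, hitn]
    simpa only [hitn] using hmain
  · -- unseeded case: p[i] is still 1
    have hpi1 : p.getD i 1 = 1 := hone i le_rfl
    have hmain := tail_inv arr p ret right index i hlen hi
      (fun j' hj' => hone j' (by omega)) hpg hret hri
      (by rw [hpi1]) (by rw [hpi1])
    have hitn : ((i : Int)).toNat = i := by omega
    unfold astep
    simp only [if_neg hir]
    simpa only [hitn] using hmain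

lemma inv_fold (arr : List Char) (i : Nat) (hi : i ≤ arr.length) :
    AInv arr i (((List.range i).map Int.ofNat).foldl (astep arr)
      (List.replicate arr.length 1, [], -1, -1)) := by
  induction i with
  | zero =>
    refine ⟨by simp, by simp, ?_, by omega, Or.inl ⟨rfl, rfl⟩⟩
    intro j _
    by_cases h : j < arr.length
    · simp [List.getD, h]
    · simp [List.getD]
  | succ i ih =>
    rw [List.range_succ, List.map_append, List.foldl_append]
    exact inv_step arr i _ (ih (by omega)) (by omega)

-- ===== VERDICT (by name: the statement is the Claim_ definition above) =====
theorem palrange_spec : Claim_equal_palrange := by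
  intro s _
  unfold Spec_palrange palrange palrange_alt
  have h := inv_fold (pvArr s.toList) (pvArr s.toList).length le_rfl
  exact h.2.1
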